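-- pv_equiv track=rewrite | github.com/PawnTakesQueen/rcube | rcube.py | corner_check
-- ===== SOURCE A (Python) =====
-- def corner_check(corners, f_corners):
--     corner_b = 0
--     corner_c = 0
--     for corner in corners:
--         for i in range(len(corners)):
--             if corner in f_corners[i]:
--                 if f_corners[i].index(corner) == 1:
--                     corner_b += 1
--                 elif f_corners[i].index(corner) == 2:
--                     corner_c += 1
--     if (corner_b + (2 * corner_c)) % 3 == 0:
--         return 1
--     return 0
-- ===== SOURCE B (Python) =====
-- def corner_check(corners, f_corners):
--     cnt = {}
--     for c in corners:
--         cnt[c] = cnt.get(c, 0) + 1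
--     corner_b = 0
--     corner_c = 0
--     for i in range(len(corners)):
--         f = f_corners[i]
--         if len(f) > 1 and f[1] != f[0]:
--             corner_b += cnt.get(f[1], 0)
--         if len(f) > 2 and f[2] != f[0] and f[2] != f[1]:
--             corner_c += cnt.get(f[2], 0)
--     return 1 if (corner_b + 2 * corner_c) % 3 == 0 else 0
-- ===== Notes on version B (the rewrite author's own statement) =====
-- stated objective: faster
-- what changed: A scans every corner against every face and calls .index inside the double loop; B builds a counting dict over corners once and makes a single pass over the faces, reading orientation slots 1 and 2 directly (guarding against an equal earlier slot) and adding the precomputed multiplicity.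
import Mathlib
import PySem

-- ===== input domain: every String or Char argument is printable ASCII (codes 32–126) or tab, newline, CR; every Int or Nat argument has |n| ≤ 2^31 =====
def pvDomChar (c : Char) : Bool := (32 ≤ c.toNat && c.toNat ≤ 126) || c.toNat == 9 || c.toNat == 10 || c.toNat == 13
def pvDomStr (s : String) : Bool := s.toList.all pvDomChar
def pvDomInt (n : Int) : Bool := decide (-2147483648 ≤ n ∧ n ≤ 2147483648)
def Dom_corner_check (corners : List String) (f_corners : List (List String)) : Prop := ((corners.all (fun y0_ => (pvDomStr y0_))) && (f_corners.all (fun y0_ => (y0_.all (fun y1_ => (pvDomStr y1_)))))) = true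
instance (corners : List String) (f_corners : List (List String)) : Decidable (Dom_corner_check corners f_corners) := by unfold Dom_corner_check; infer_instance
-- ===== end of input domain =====

-- B replaces A's corner×face double scan (with a linear .index inside) by a counting dict over
-- corners plus a single pass over the faces reading slots 1 and 2 directly (objective: faster).

-- ===== PORT A =====
def corner_check (corners : List String) (f_corners : List (List String)) : Int :=
  let bc : Int × Int := corners.foldl (fun bc corner =>
    (PySem.List.pyRange 0 corners.length 1).foldl (fun bc i =>
      let f := PySem.List.pyGetD f_corners i []
      if corner ∈ f then
        if PySem.List.index? f corner = some 1 then (bc.1 + 1, bc.2)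
        else if PySem.List.index? f corner = some 2 then (bc.1, bc.2 + 1)
        else bc
      else bc) bc) (0, 0)
  if PySem.Int.mod (bc.1 + 2 * bc.2) 3 = 0 then 1 else 0

-- ===== PORT B =====
def corner_check_alt (corners : List String) (f_corners : List (List String)) : Int :=
  let cnt : PySem.Dict String Int :=
    corners.foldl (fun d c => d.insert c (d.getD c 0 + 1)) PySem.Dict.empty
  let bc : Int × Int := (PySem.List.pyRange 0 corners.length 1).foldl (fun bc i =>
    let f := PySem.List.pyGetD f_corners i []
    let b := if 1 < f.length ∧ PySem.List.pyGetD f 1 "" ≠ PySem.List.pyGetD f 0 ""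
             then bc.1 + cnt.getD (PySem.List.pyGetD f 1 "") 0 else bc.1
    let c := if 2 < f.length ∧ PySem.List.pyGetD f 2 "" ≠ PySem.List.pyGetD f 0 ""
                ∧ PySem.List.pyGetD f 2 "" ≠ PySem.List.pyGetD f 1 ""
             then bc.2 + cnt.getD (PySem.List.pyGetD f 2 "") 0 else bc.2
    (b, c)) (0, 0)
  if PySem.Int.mod (bc.1 + 2 * bc.2) 3 = 0 then 1 else 0

-- ===== PRECONDITION & SPEC =====
-- A indexes f_corners[i] for every i < len(corners): it raises IndexError when f_corners is
-- shorter than corners; exactly those inputs are excluded.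
def Pre_corner_check (corners : List String) (f_corners : List (List String)) : Prop :=
  corners.length ≤ f_corners.length
instance (corners : List String) (f_corners : List (List String)) : Decidable (Pre_corner_check corners f_corners) := by unfold Pre_corner_check; infer_instance
def pvWitness_corner_check : List String × List (List String) :=
  (["a", "b"], [["a", "b", "c"], ["b", "a", "c"]])
def Spec_corner_check (corners : List String) (f_corners : List (List String)) (out : Int) : Prop := out = corner_check_alt corners f_corners
instance (corners : List String) (f_corners : List (List String)) (out : Int) : Decidable (Spec_corner_check corners f_corners out) := by unfold Spec_corner_check; infer_instance

-- ===== CLAIM (what is proved, stated in full; the proofs are below) =====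
def Claim_equal_corner_check : Prop := ∀ (corners : List String) (f_corners : List (List String)), Dom_corner_check corners f_corners → Pre_corner_check corners f_corners → Spec_corner_check corners f_corners (corner_check corners f_corners)

-- ===== LEMMAS AND PROOFS =====

-- A's per-(corner,face) increments.
def pvUA (c : String) (f : List String) : Int :=
  if PySem.List.index? f c = some 1 then 1 else 0
def pvVA (c : String) (f : List String) : Int :=
  if PySem.List.index? f c = some 2 then 1 else 0

-- B's per-face increments.
def pvUB (corners : List String) (f : List String) : Int :=
  if 1 < f.length ∧ PySem.List.pyGetD f 1 "" ≠ PySem.List.pyGetD f 0 ""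
  then (corners.count (PySem.List.pyGetD f 1 "") : Int) else 0
def pvVB (corners : List String) (f : List String) : Int :=
  if 2 < f.length ∧ PySem.List.pyGetD f 2 "" ≠ PySem.List.pyGetD f 0 ""
       ∧ PySem.List.pyGetD f 2 "" ≠ PySem.List.pyGetD f 1 ""
  then (corners.count (PySem.List.pyGetD f 2 "") : Int) else 0

theorem pv_get0 (a : String) (t : List String) : PySem.List.pyGetD (a :: t) 0 "" = a :=
  PySem.List.pyGetD_zero_cons a t ""

theorem pv_get1 (a b : String) (t : List String) :
    PySem.List.pyGetD (a :: b :: t) 1 "" = b := by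
  simp [PySem.List.pyGetD, PySem.List.pyGet?, PySem.List.pyIdx?]

theorem pv_get2 (a b c : String) (t : List String) :
    PySem.List.pyGetD (a :: b :: c :: t) 2 "" = c := by
  simp [PySem.List.pyGetD, PySem.List.pyGet?, PySem.List.pyIdx?,
    show (2 : Int) ≤ ↑t.length + 1 + 1 by omega]

theorem pv_foldl_pair_add {α : Type} (u v : α → Int) (l : List α) (p : Int × Int) :
    l.foldl (fun bc x => (bc.1 + u x, bc.2 + v x)) p
      = (p.1 + (l.map u).sum, p.2 + (l.map v).sum) := by
  induction l generalizing p with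
  | nil => simp
  | cons x t ih => simp [ih, add_assoc]

theorem pv_sum_comm {α β : Type} (l1 : List α) (l2 : List β) (g : α → β → Int) :
    (l1.map (fun a => (l2.map (g a)).sum)).sum
      = (l2.map (fun b => (l1.map (fun a => g a b)).sum)).sum := by
  induction l1 with
  | nil => simp
  | cons x t ih =>
      simp only [List.map_cons, List.sum_cons, ih]
      rw [← PySem.List.sum_map_add_int]

theorem pv_index?_one (f : List String) (c : String) :
    PySem.List.index? f c = some 1 ↔ ∃ a t, f = a :: c :: t ∧ a ≠ c := by
  rw [PySem.List.index?_eq_some_iff]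
  constructor
  · rintro ⟨pre, suf, rfl, hlen, hnot⟩
    match pre, hlen with
    | [a], _ => exact ⟨a, suf, rfl, fun h => hnot (by simp [h])⟩
  · rintro ⟨a, t, rfl, hne⟩
    exact ⟨[a], t, rfl, rfl, by simpa using fun h => hne h.symm⟩

theorem pv_index?_two (f : List String) (c : String) :
    PySem.List.index? f c = some 2 ↔ ∃ a b t, f = a :: b :: c :: t ∧ a ≠ c ∧ b ≠ c := by
  rw [PySem.List.index?_eq_some_iff]
  constructor
  · rintro ⟨pre, suf, rfl, hlen, hnot⟩
    match pre, hlen with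
    | [a, b], _ =>
      exact ⟨a, b, suf, rfl, fun h => hnot (by simp [h]), fun h => hnot (by simp [h])⟩
  · rintro ⟨a, b, t, rfl, ha, hb⟩
    refine ⟨[a, b], t, rfl, rfl, ?_⟩
    simp only [List.mem_cons, List.not_mem_nil, or_false]
    exact fun h => h.elim (fun h => ha h.symm) (fun h => hb h.symm)

theorem pv_count_int (l : List String) (x : String) :
    ((l.map (fun c => if c = x then (1 : Int) else 0)).sum) = (l.count x : Int) := by
  induction l with
  | nil => simp
  | cons y t ih =>
      by_cases h : y = x <;> simp [h, ih, add_comm]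

theorem pv_pointwise_u (corners : List String) (f : List String) :
    (corners.map (fun c => pvUA c f)).sum = pvUB corners f := by
  unfold pvUB
  split_ifs with h
  · obtain ⟨h1, hne⟩ := h
    match f, h1 with
    | a :: b :: t, _ =>
      rw [pv_get1] at *
      rw [pv_get0] at hne
      have hfun : ∀ c, pvUA c (a :: b :: t) = if c = b then (1 : Int) else 0 := by
        intro c
        unfold pvUA
        by_cases hc : c = b
        · subst hc
          rw [if_pos ((pv_index?_one _ _).mpr ⟨a, t, rfl, fun h => hne h.symm⟩), if_pos rfl]
        · rw [if_neg, if_neg hc]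
          intro h'
          obtain ⟨a', t', heq, _⟩ := (pv_index?_one _ _).mp h'
          injection heq with _ h2; injection h2 with h3 _
          exact hc h3.symm
      simp only [hfun]
      exact pv_count_int corners b
  · have hz : ∀ c, pvUA c f = 0 := by
      intro c
      unfold pvUA
      rw [if_neg]
      rw [pv_index?_one]
      rintro ⟨a, t, rfl, hne⟩
      exact h ⟨by simp, by rw [pv_get1, pv_get0]; exact fun h' => hne h'.symm⟩
    simp [hz]

theorem pv_pointwise_v (corners : List String) (f : List String) :
    (corners.map (fun c => pvVA c f)).sum = pvVB corners f := by
  unfold pvVB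
  split_ifs with h
  · obtain ⟨h1, hne0, hne1⟩ := h
    match f, h1 with
    | a :: b :: d :: t, _ =>
      rw [pv_get2] at *
      rw [pv_get0] at hne0
      rw [pv_get1] at hne1
      have hfun : ∀ c, pvVA c (a :: b :: d :: t) = if c = d then (1 : Int) else 0 := by
        intro c
        unfold pvVA
        by_cases hc : c = d
        · subst hc
          rw [if_pos ((pv_index?_two _ _).mpr
              ⟨a, b, t, rfl, fun h => hne0 h.symm, fun h => hne1 h.symm⟩), if_pos rfl]
        · rw [if_neg, if_neg hc]
          intro h'
          obtain ⟨a', b', t', heq, _, _⟩ := (pv_index?_two _ _).mp h'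
          injection heq with _ h2; injection h2 with _ h3; injection h3 with h4 _
          exact hc h4.symm
      simp only [hfun]
      exact pv_count_int corners d
  · have hz : ∀ c, pvVA c f = 0 := by
      intro c
      unfold pvVA
      rw [if_neg]
      rw [pv_index?_two]
      rintro ⟨a, b, t, rfl, ha, hb⟩
      refine h ⟨by simp, ?_, ?_⟩
      · rw [pv_get2, pv_get0]; exact fun h' => ha h'.symm
      · rw [pv_get2, pv_get1]; exact fun h' => hb h'.symm
    simp [hz]

-- A's step, rewritten as two independent additions.
theorem pv_stepA (f : List String) (c : String) (bc : Int × Int) :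
    (if c ∈ f then
        if PySem.List.index? f c = some 1 then (bc.1 + 1, bc.2)
        else if PySem.List.index? f c = some 2 then (bc.1, bc.2 + 1)
        else bc
      else bc) = (bc.1 + pvUA c f, bc.2 + pvVA c f) := by
  unfold pvUA pvVA
  by_cases hm : c ∈ f
  · rw [if_pos hm]
    by_cases h1 : PySem.List.index? f c = some 1
    · have h2 : PySem.List.index? f c ≠ some 2 := by rw [h1]; simp
      rw [if_pos h1, if_pos h1, if_neg h2]
      simp
    · rw [if_neg h1, if_neg h1]
      by_cases h2 : PySem.List.index? f c = some 2
      · rw [if_pos h2, if_pos h2]; simp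
      · rw [if_neg h2, if_neg h2]; simp
  · have hn : PySem.List.index? f c = none := by
      rw [PySem.List.index?_eq_none_iff]; exact hm
    rw [if_neg hm, hn]
    simp

-- B's step, rewritten as two independent additions (its counting dict read off as List.count).
theorem pv_stepB (corners f : List String) (bc : Int × Int) :
    ((if 1 < f.length ∧ PySem.List.pyGetD f 1 "" ≠ PySem.List.pyGetD f 0 ""
      then bc.1 + (corners.foldl (fun d c => d.insert c (d.getD c 0 + 1))
              (PySem.Dict.empty : PySem.Dict String Int)).getD (PySem.List.pyGetD f 1 "") 0
      else bc.1),
     (if 2 < f.length ∧ PySem.List.pyGetD f 2 "" ≠ PySem.List.pyGetD f 0 ""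
          ∧ PySem.List.pyGetD f 2 "" ≠ PySem.List.pyGetD f 1 ""
      then bc.2 + (corners.foldl (fun d c => d.insert c (d.getD c 0 + 1))
              (PySem.Dict.empty : PySem.Dict String Int)).getD (PySem.List.pyGetD f 2 "") 0
      else bc.2)) = (bc.1 + pvUB corners f, bc.2 + pvVB corners f) := by
  have hcnt : ∀ x : String,
      (corners.foldl (fun d c => d.insert c (d.getD c 0 + 1))
        (PySem.Dict.empty : PySem.Dict String Int)).getD x 0 = (corners.count x : Int) := by
    intro x
    rw [PySem.Dict.getD_foldl_insert_add_one]
    simp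
  unfold pvUB pvVB
  rw [hcnt, hcnt]
  split_ifs <;> simp

theorem corner_check_spec : Claim_equal_corner_check := by
  intro corners f_corners _dom _pre
  unfold Spec_corner_check corner_check corner_check_alt
  simp only [pv_stepA, pv_stepB, pv_foldl_pair_add]
  rw [pv_sum_comm corners (PySem.List.pyRange 0 (corners.length : Int) 1)
      (fun c i => pvUA c (PySem.List.pyGetD f_corners i [])),
     pv_sum_comm corners (PySem.List.pyRange 0 (corners.length : Int) 1)
      (fun c i => pvVA c (PySem.List.pyGetD f_corners i []))]
  simp only [pv_pointwise_u, pv_pointwise_v]
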